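-- pv_equiv track=rewrite | github.com/Tejasss22/Python | Practical/practical_no6/dfa_ends_with_b.py | q0
-- ===== SOURCE A (Python) =====
-- def q0(text):
-- 	if len(text)>0 :
-- 		symbol = text[0];
-- 		if symbol in text :
-- 			if symbol == 'a':
-- 				return q0(text[1:])
-- 			else:
-- 				return q1(text[1:])
--
-- 		else:
-- 			return "Rejected"
-- 	else:
-- 		return "q0"
--
-- def q1(text):
-- 	if len(text)>0 :
-- 		symbol = text[0];
-- 		if symbol in text :
-- 			if symbol == 'a':
-- 				return q0(text[1:])
-- 			else:
-- 				return q1(text[1:])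
--
-- 		else:
-- 			return "Rejected"
-- 	else:
-- 		return "q1"
-- ===== SOURCE B (Python) =====
-- def q0(text):
--     if not text:
--         return "q0"
--     return "q0" if text[-1] == 'a' else "q1"
-- ===== Notes on version B (the rewrite author's own statement) =====
-- stated objective: faster
-- what changed: B replaces A's mutual recursion with repeated slicing (each step copies the tail and runs a membership scan) by a single inspection of the last character: the DFA's final state depends only on it.
import Mathlib
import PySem

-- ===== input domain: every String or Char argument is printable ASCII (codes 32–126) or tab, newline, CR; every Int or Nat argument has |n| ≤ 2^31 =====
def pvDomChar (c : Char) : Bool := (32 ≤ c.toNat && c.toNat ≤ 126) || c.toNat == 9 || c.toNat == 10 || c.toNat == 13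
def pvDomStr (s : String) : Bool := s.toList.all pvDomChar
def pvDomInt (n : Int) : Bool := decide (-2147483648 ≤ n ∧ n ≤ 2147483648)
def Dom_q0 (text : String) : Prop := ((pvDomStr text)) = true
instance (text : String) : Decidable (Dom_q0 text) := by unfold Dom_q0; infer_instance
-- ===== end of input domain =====

-- B inspects only the last character; why: the DFA's final state depends only on it (objective: faster).

-- ===== PORT A =====
-- A's mutual recursion on the tail slice, transcribed on the character list.
mutual
def q0Rec : List Char → String
  | [] => "q0"
  | c :: rest =>
      if PySem.Chars.isIn [c] (c :: rest) then
        (if c = 'a' then q0Rec rest else q1Rec rest)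
      else "Rejected"
def q1Rec : List Char → String
  | [] => "q1"
  | c :: rest =>
      if PySem.Chars.isIn [c] (c :: rest) then
        (if c = 'a' then q0Rec rest else q1Rec rest)
      else "Rejected"
end

def q0 (text : String) : String := q0Rec text.toList

-- ===== PORT B =====
def q0_alt (text : String) : String :=
  match text.toList.getLast? with
  | none => "q0"
  | some c => if c = 'a' then "q0" else "q1"

-- ===== PRECONDITION & SPEC =====
def Spec_q0 (text : String) (out : String) : Prop := out = q0_alt text
instance (text : String) (out : String) : Decidable (Spec_q0 text out) := by unfold Spec_q0; infer_instance

-- ===== CLAIM (what is proved, stated in full; the proofs are below) =====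
def Claim_equal_q0 : Prop := ∀ (text : String), Dom_q0 text → Spec_q0 text (q0 text)

-- ===== LEMMAS AND PROOFS =====

-- The head is a member of the nonempty list, so A's 'symbol in text' guard is always true.
theorem isIn_head (c : Char) (rest : List Char) :
    PySem.Chars.isIn [c] (c :: rest) = true := by
  rw [PySem.Chars.isIn_iff_infix]
  exact ⟨[], rest, rfl⟩

-- Both of A's states, run on l ++ [c], end in the state determined by the last character c.
theorem rec_concat (l : List Char) (c : Char) :
    q0Rec (l ++ [c]) = (if c = 'a' then "q0" else "q1") ∧
    q1Rec (l ++ [c]) = (if c = 'a' then "q0" else "q1") := by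
  induction l with
  | nil => constructor <;> simp [q0Rec, q1Rec, isIn_head]
  | cons d l ih =>
      constructor <;>
        simp [q0Rec, q1Rec, isIn_head, ih.1, ih.2]

-- ===== VERDICT (by name: the statement is the Claim_ definition above) =====
theorem q0_spec : Claim_equal_q0 := by
  intro text _
  unfold Spec_q0 q0 q0_alt
  rcases List.eq_nil_or_concat text.toList with h | ⟨l, c, h⟩
  · rw [h]; rfl
  · rw [h, List.concat_eq_append, (rec_concat l c).1, List.getLast?_concat]
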